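-- pv_equiv track=rewrite | github.com/iproha94/contests | 1119/d.py | f
-- ===== SOURCE A (Python) =====
-- def f(n, s_arr, q, l_k_arr):
--     s_arr.sort()
--     s_arr = list(dict.fromkeys(s_arr))
--     all_rez = []
--     for l, k in l_k_arr:
--         diap = []
--         diap.append([s_arr[0] + l, s_arr[0] + k])
--         for i in range(1, len(s_arr)):
--             d1 = l + s_arr[i]
--             d2 = k + s_arr[i]
--             if diap[-1][0] <= d1 and diap[-1][1] >= d1:
--                 if d2 > diap[-1][1]:
--                     diap[-1][1] = d2
--             else:
--                 diap.append([d1, d2])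
--         rez = 0
--         for d1, d2 in diap:
--             rez += (d2 - d1 + 1)
--         all_rez.append(rez)
--
--     return ''.join(str(e) + ' ' for e in all_rez)
-- ===== SOURCE B (Python) =====
-- def f(n, s_arr, q, l_k_arr):
--     t = sorted(set(s_arr))
--     gaps = [b - a for a, b in zip(t, t[1:])]
--     out = []
--     for l, k in l_k_arr:
--         w = k - l
--         out.append(w + 1 + sum(g if g <= w else w + 1 for g in gaps))
--     return ''.join(str(e) + ' ' for e in out)
-- ===== Notes on version B (the rewrite author's own statement) =====
-- stated objective: faster
-- what changed: B drops A's per-query interval-building merge scan entirely: it precomputes once the list of consecutive gaps of the sorted distinct shifts and answers each query with a closed-form sum over those gaps (each gap contributes itself if it is at most k-l, else k-l+1).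
import Mathlib
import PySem

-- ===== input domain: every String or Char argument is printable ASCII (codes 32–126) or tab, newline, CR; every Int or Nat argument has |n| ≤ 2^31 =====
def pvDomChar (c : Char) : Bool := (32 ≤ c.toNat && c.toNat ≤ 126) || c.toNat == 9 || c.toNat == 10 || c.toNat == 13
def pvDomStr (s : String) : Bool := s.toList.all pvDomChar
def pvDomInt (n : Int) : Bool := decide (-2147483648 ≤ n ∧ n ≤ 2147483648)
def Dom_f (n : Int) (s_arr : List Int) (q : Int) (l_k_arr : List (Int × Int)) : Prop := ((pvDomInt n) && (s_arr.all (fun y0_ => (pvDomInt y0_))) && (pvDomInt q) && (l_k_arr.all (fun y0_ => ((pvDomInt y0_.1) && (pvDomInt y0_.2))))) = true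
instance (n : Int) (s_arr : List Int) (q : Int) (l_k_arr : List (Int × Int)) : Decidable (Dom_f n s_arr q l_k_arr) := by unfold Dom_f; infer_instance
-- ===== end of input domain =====

-- B replaces A's per-query interval-merging scan by a once-precomputed list of consecutive
-- gaps of the sorted distinct shifts and a per-query closed-form sum over those gaps
-- (objective: faster by a constant factor — no per-query interval list is built).
-- Note: A sorts s_arr in place (observable mutation); B does not. The equivalence proved
-- here is about the RETURN value only.

-- ===== PORT A =====
def f (n : Int) (s_arr : List Int) (q : Int) (l_k_arr : List (Int × Int)) : String :=
  -- s_arr.sort(); s_arr = list(dict.fromkeys(s_arr))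
  let s1 := PySem.List.sorted s_arr (fun x => x)
  let s2 := PySem.List.dedup s1
  -- for l, k in l_k_arr: … all_rez.append(rez)
  let all_rez := l_k_arr.foldl (fun all_rez lk =>
    let l := lk.1
    let k := lk.2
    -- diap = [[s_arr[0] + l, s_arr[0] + k]]   (s2 = [] raises IndexError: excluded by Pre_f)
    let diap : List (Int × Int) := [(PySem.List.pyGetD s2 0 0 + l, PySem.List.pyGetD s2 0 0 + k)]
    -- for i in range(1, len(s_arr)): …
    let diap := (PySem.List.pyRange 1 (PySem.List.len s2)).foldl (fun diap i =>
      let d1 := l + PySem.List.pyGetD s2 i 0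
      let d2 := k + PySem.List.pyGetD s2 i 0
      let last := PySem.List.pyGetD diap (-1) (0, 0)
      if last.1 ≤ d1 ∧ last.2 ≥ d1 then
        if d2 > last.2 then PySem.List.pySetD diap (-1) (last.1, d2) else diap
      else
        diap ++ [(d1, d2)]) diap
    -- rez = 0; for d1, d2 in diap: rez += (d2 - d1 + 1)
    let rez := diap.foldl (fun rez p => rez + (p.2 - p.1 + 1)) 0
    all_rez ++ [rez]) []
  -- ''.join(str(e) + ' ' for e in all_rez)
  PySem.Str.join "" (all_rez.map (fun e => PySem.Int.toStr e ++ " "))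

-- ===== PORT B =====
def f_alt (n : Int) (s_arr : List Int) (q : Int) (l_k_arr : List (Int × Int)) : String :=
  -- t = sorted(set(s_arr))
  let t := PySem.List.sorted (PySem.Set.ofList s_arr) (fun x => x)
  -- gaps = [b - a for a, b in zip(t, t[1:])]
  let gaps := (t.zip (PySem.List.slice t (some 1) none)).map (fun ab => ab.2 - ab.1)
  -- out.append(w + 1 + sum(g if g <= w else w + 1 for g in gaps))
  let out := l_k_arr.map (fun lk =>
    let w := lk.2 - lk.1
    w + 1 + (gaps.map (fun g => if g ≤ w then g else w + 1)).sum)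
  -- ''.join(str(e) + ' ' for e in out)
  PySem.Str.join "" (out.map (fun e => PySem.Int.toStr e ++ " "))

-- ===== PRECONDITION & SPEC =====
-- Pre_f excludes exactly the inputs on which A raises IndexError (empty s_arr with at
-- least one query: A indexes s_arr[0] inside the query loop); A returns on all others.
def Pre_f (n : Int) (s_arr : List Int) (q : Int) (l_k_arr : List (Int × Int)) : Prop :=
  s_arr ≠ [] ∨ l_k_arr = []
instance (n : Int) (s_arr : List Int) (q : Int) (l_k_arr : List (Int × Int)) : Decidable (Pre_f n s_arr q l_k_arr) := by unfold Pre_f; infer_instance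

def pvWitness_f : Int × List Int × Int × (List (Int × Int)) := (3, [1, 2], 1, [(1, 2)])

def Spec_f (n : Int) (s_arr : List Int) (q : Int) (l_k_arr : List (Int × Int)) (out : String) : Prop := out = f_alt n s_arr q l_k_arr
instance (n : Int) (s_arr : List Int) (q : Int) (l_k_arr : List (Int × Int)) (out : String) : Decidable (Spec_f n s_arr q l_k_arr out) := by unfold Spec_f; infer_instance

-- ===== CLAIM (what is proved, stated in full; the proofs are below) =====
def Claim_equal_f : Prop := ∀ (n : Int) (s_arr : List Int) (q : Int) (l_k_arr : List (Int × Int)), Dom_f n s_arr q l_k_arr → Pre_f n s_arr q l_k_arr → Spec_f n s_arr q l_k_arr (f n s_arr q l_k_arr)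

-- ===== LEMMAS AND PROOFS =====

-- A's set-up list equals B's: dedup of the sorted list = sorted list of the distinct elements.
theorem ofList_pairwise_lt (xs : List Int) (h : xs.Pairwise (· ≤ ·)) :
    (PySem.Set.ofList xs).Pairwise (· < ·) := by
  induction xs with
  | nil => simp [PySem.Set.ofList_nil]
  | cons x xs ih =>
    rw [List.pairwise_cons] at h
    rw [PySem.Set.ofList_cons]
    refine List.Pairwise.cons ?_ ?_
    · intro y hy
      rw [PySem.Set.mem_discard] at hy
      exact lt_of_le_of_ne (h.1 y ((PySem.Set.mem_ofList xs y).mp hy.1)) (Ne.symm hy.2)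
    · exact (ih h.2).filter _

theorem dedup_sorted_eq (xs : List Int) :
    PySem.List.dedup (PySem.List.sorted xs (fun x => x)) =
      PySem.List.sorted (PySem.Set.ofList xs) (fun x => x) := by
  symm
  apply PySem.List.sorted_eq_of_perm_of_pairwise_lt
  · rw [PySem.List.dedup_eq_ofList,
      List.perm_ext_iff_of_nodup (PySem.Set.nodup_ofList _) (PySem.Set.nodup_ofList _)]
    intro a
    rw [PySem.Set.mem_ofList, PySem.Set.mem_ofList, PySem.List.mem_sorted]
  · rw [PySem.List.dedup_eq_ofList]
    exact ofList_pairwise_lt _ (PySem.List.sorted_pairwise xs _)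

-- setting the last element of a list known to end in [p]
theorem pySetD_neg_one_append_singleton {α : Type} (xs : List α) (p v : α) :
    PySem.List.pySetD (xs ++ [p]) (-1) v = xs ++ [v] := by
  simp [PySem.List.pySetD, PySem.List.pySet?, PySem.List.pyIdx?]

-- A's inner loop body, abstracted over the current element
def pvBody (l k : Int) (diap : List (Int × Int)) (v : Int) : List (Int × Int) :=
  let d1 := l + v
  let d2 := k + v
  let last := PySem.List.pyGetD diap (-1) (0, 0)
  if last.1 ≤ d1 ∧ last.2 ≥ d1 then
    if d2 > last.2 then PySem.List.pySetD diap (-1) (last.1, d2) else diap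
  else
    diap ++ [(d1, d2)]

-- total covered length of a list of intervals
def pvS (d : List (Int × Int)) : Int := (d.map (fun p => p.2 - p.1 + 1)).sum

-- contribution of the chain of gaps prev, r₀, r₁, … under limit w = k - l
def pvChain (l k : Int) : Int → List Int → Int
  | _, [] => 0
  | prev, s :: r =>
      (if s - prev ≤ k - l then s - prev else k - l + 1) + pvChain l k s r

theorem pvChain_eq_zipSum (l k : Int) : ∀ (rest : List Int) (prev : Int),
    pvChain l k prev rest =
      (((prev :: rest).zip rest).map
        (fun ab => if ab.2 - ab.1 ≤ k - l then ab.2 - ab.1 else k - l + 1)).sum := by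
  intro rest
  induction rest with
  | nil => intro prev; rfl
  | cons s r ih => intro prev; simp [pvChain, List.zip, ih s]

-- the loop invariant: folding A's body over the rest of a strictly increasing chain
theorem loop_sum (l k : Int) : ∀ (rest : List Int) (init : List (Int × Int)) (a prev : Int),
    (∀ s ∈ rest, prev < s) → rest.Pairwise (· < ·) → a ≤ l + prev →
    pvS (rest.foldl (pvBody l k) (init ++ [(a, k + prev)])) =
      pvS (init ++ [(a, k + prev)]) + pvChain l k prev rest := by
  intro rest
  induction rest with
  | nil => intro init a prev _ _ _; simp [pvChain]
  | cons s r ih =>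
    intro init a prev hlt hpw ha
    have hps : prev < s := hlt s (by simp)
    have hstep : pvBody l k (init ++ [(a, k + prev)]) s =
        if s - prev ≤ k - l then init ++ [(a, k + s)]
        else (init ++ [(a, k + prev)]) ++ [(l + s, k + s)] := by
      unfold pvBody
      rw [PySem.List.pyGetD_neg_one_append_singleton]
      by_cases hc : s - prev ≤ k - l
      · rw [if_pos (by constructor <;> omega), if_pos (by omega), if_pos hc,
          pySetD_neg_one_append_singleton]
      · rw [if_neg (by omega), if_neg hc]
    rw [List.pairwise_cons] at hpw
    simp only [List.foldl_cons, hstep, pvChain]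
    by_cases hc : s - prev ≤ k - l
    · rw [if_pos hc, if_pos hc,
        ih init a s hpw.1 hpw.2 (by omega)]
      simp only [pvS, List.map_append, List.sum_append, List.map_cons]
      simp; omega
    · rw [if_neg hc, if_neg hc,
        ih (init ++ [(a, k + prev)]) (l + s) s hpw.1 hpw.2 (by omega)]
      simp only [pvS, List.map_append, List.sum_append, List.map_cons]
      simp; omega

-- per-query value of A on the (nonempty, strictly increasing) distinct sorted list
theorem query_eq (l k x : Int) (rest : List Int) (hpw : (x :: rest).Pairwise (· < ·)) :
    pvS (rest.foldl (pvBody l k) [(x + l, x + k)]) =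
      k - l + 1 + pvChain l k x rest := by
  rw [List.pairwise_cons] at hpw
  have h0 : ([] : List (Int × Int)) ++ [(x + l, k + x)] = [(x + l, x + k)] := by
    simp [Int.add_comm]
  have := loop_sum l k rest [] (x + l) x hpw.1 hpw.2 (by omega)
  rw [h0] at this
  rw [this]
  simp [pvS]

-- A's per-query computation, as a function of the deduplicated sorted list
def pvArez (t : List Int) (lk : Int × Int) : Int :=
  let diap : List (Int × Int) := [(PySem.List.pyGetD t 0 0 + lk.1, PySem.List.pyGetD t 0 0 + lk.2)]
  let diap := (PySem.List.pyRange 1 (PySem.List.len t)).foldl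
    (fun diap i => pvBody lk.1 lk.2 diap (PySem.List.pyGetD t i 0)) diap
  diap.foldl (fun rez p => rez + (p.2 - p.1 + 1)) 0

theorem f_eq (n : Int) (s_arr : List Int) (q : Int) (l_k_arr : List (Int × Int)) :
    f n s_arr q l_k_arr =
      PySem.Str.join "" ((l_k_arr.foldl (fun acc lk =>
          acc ++ [pvArez (PySem.List.dedup (PySem.List.sorted s_arr (fun x => x))) lk]) []).map
        (fun e => PySem.Int.toStr e ++ " ")) := rfl

-- B's per-query computation, as a function of the gap list
def pvBrez (gaps : List Int) (lk : Int × Int) : Int :=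
  let w := lk.2 - lk.1
  w + 1 + (gaps.map (fun g => if g ≤ w then g else w + 1)).sum

theorem f_alt_eq (n : Int) (s_arr : List Int) (q : Int) (l_k_arr : List (Int × Int)) :
    f_alt n s_arr q l_k_arr =
      PySem.Str.join "" ((l_k_arr.map (pvBrez
        (((PySem.List.sorted (PySem.Set.ofList s_arr) (fun x => x)).zip
            (PySem.List.slice (PySem.List.sorted (PySem.Set.ofList s_arr) (fun x => x)) (some 1) none)).map
          (fun ab => ab.2 - ab.1)))).map
        (fun e => PySem.Int.toStr e ++ " ")) := rfl

-- per-query agreement on a nonempty strictly increasing t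
theorem per_query_eq (t : List Int) (x : Int) (rest : List Int) (hx : t = x :: rest)
    (hpw : (x :: rest).Pairwise (· < ·)) (lk : Int × Int) :
    pvArez t lk =
      pvBrez ((t.zip (PySem.List.slice t (some 1) none)).map (fun ab => ab.2 - ab.1)) lk := by
  simp only [pvArez, pvBrez]
  rw [PySem.List.foldl_pyRange_pyGetD t 0 (pvBody lk.1 lk.2) _ (by norm_num)]
  rw [PySem.List.slice_from_one, hx]
  simp only [PySem.List.pyGetD_zero_cons]
  rw [show List.drop (Int.toNat 1) (x :: rest) = rest from rfl]
  have hS : (rest.foldl (pvBody lk.1 lk.2) [(x + lk.1, x + lk.2)]).foldl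
      (fun rez p => rez + (p.2 - p.1 + 1)) 0 =
      pvS (rest.foldl (pvBody lk.1 lk.2) [(x + lk.1, x + lk.2)]) := by
    rw [pvS, PySem.List.foldl_add]; simp
  rw [hS, query_eq lk.1 lk.2 x rest hpw, pvChain_eq_zipSum lk.1 lk.2 rest x]
  rw [List.map_map]
  have : ((fun g => if g ≤ lk.2 - lk.1 then g else lk.2 - lk.1 + 1) ∘ fun ab : Int × Int => ab.2 - ab.1)
      = fun ab : Int × Int => if ab.2 - ab.1 ≤ lk.2 - lk.1 then ab.2 - ab.1 else lk.2 - lk.1 + 1 := rfl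
  rw [this]
  simp [List.tail]

-- ===== VERDICT (by name: the statement is the Claim_ definition above) =====
theorem f_spec : Claim_equal_f := by
  intro n s_arr q l_k_arr _ hpre
  unfold Spec_f
  rw [f_eq, f_alt_eq, dedup_sorted_eq,
    PySem.List.foldl_append_singleton_eq_map, List.nil_append]
  rcases hpre with hne | hnil
  swap
  · subst hnil; rfl
  obtain ⟨y, ys, hy⟩ := List.exists_cons_of_ne_nil hne
  set t := PySem.List.sorted (PySem.Set.ofList s_arr) (fun x => x) with ht
  have htne : t ≠ [] := by
    intro h0
    have : y ∈ t := by
      rw [ht, PySem.List.mem_sorted, PySem.Set.mem_ofList]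
      simp [hy]
    simp [h0] at this
  obtain ⟨x, rest, hx⟩ := List.exists_cons_of_ne_nil htne
  have hpw : (x :: rest).Pairwise (· < ·) := by
    rw [← hx, ht]; exact PySem.List.sorted_ofList_pairwise_lt s_arr
  congr 1
  congr 1
  apply List.map_congr_left
  intro lk _
  rw [per_query_eq t x rest hx hpw lk]
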